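-- pv_equiv track=rewrite | github.com/QuAIR/QuAIRKit | quairkit/core/state/backend/operator.py | _convert_basis
-- ===== SOURCE A (Python) =====
-- from typing import Callable, Dict, Iterator, List, Optional, Tuple, Union
--
-- def _convert_basis(qubits_idx: List[int], pauli_str: str) -> Tuple[str, List[int]]:
--     r"""Process Pauli string to get operators applied to the state before z-measurement.
--
--     Args:
--         qubits_idx: the indices of the qubits to be measured.
--         pauli_str: the Pauli basis to measure, can be a string composed of 'i', 'x', 'y', or 'z'.
--
--     Returns:
--         a qasm string that applies the necessary basis change operations before measurement,
--         and a list of observable values (+-1) for each measurement outcome.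
--     """
--     obs_vals = [1]
--     list_recover_op = []
--     for i, char in enumerate(pauli_str.lower()):
--         idx = qubits_idx[i]
--         if char == "x":
--             list_recover_op.append(f"h q[{idx}];")
--             obs_vals = [v for x in obs_vals for v in (x, -x)]
--         elif char == "y":
--             list_recover_op.extend([f"sdg q[{idx}];", f"h q[{idx}];"])
--             obs_vals = [v for x in obs_vals for v in (x, -x)]
--         elif char in "z":
--             obs_vals = [v for x in obs_vals for v in (x, -x)]
--         elif char in "i":
--             obs_vals = [v for x in obs_vals for v in (x, x)]
--         else:
--             raise ValueError(f"Unsupported Pauli character {char!r} in {pauli_str!r}.")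
--
--     if not list_recover_op:
--         return '', obs_vals
--
--     qasm_recover_op = '\n'.join(list_recover_op)
--     return qasm_recover_op, obs_vals
-- ===== SOURCE B (Python) =====
-- def _gate(c, idx):
--     if c == "x":
--         return [f"h q[{idx}];"]
--     if c == "y":
--         return [f"sdg q[{idx}];", f"h q[{idx}];"]
--     return []
--
--
-- def _convert_basis(qubits_idx, pauli_str):
--     """Staged passes: validate, zip the string with the qubit indices to build
--     the recovery ops, fold the string into a bit mask (first char = most
--     significant), then compute each +-1 value as the popcount parity of the
--     outcome index ANDed with the mask (instead of repeated list doubling)."""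
--     s = pauli_str.lower()
--     bad = next((c for c in s if c not in "xyzi"), None)
--     if bad is not None:
--         raise ValueError(f"Unsupported Pauli character {bad!r} in {pauli_str!r}.")
--     ops = [g for c, idx in zip(s, qubits_idx) for g in _gate(c, idx)]
--     mask = 0
--     for c in s:
--         mask = mask * 2 + (c != "i")
--     obs_vals = [-1 if bin(k & mask).count("1") % 2 else 1 for k in range(1 << len(s))]
--     return "\n".join(ops), obs_vals
-- ===== Notes on version B (the rewrite author's own statement) =====
-- stated objective: alternative
-- what changed: Instead of one loop that repeatedly doubles the observable list while appending ops, B works in staged passes: validate the string, build the ops by zipping the string with the qubit indices, fold the string into a single bit mask, and compute each +-1 value directly as the popcount parity of the outcome index ANDed with the mask.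
import Mathlib
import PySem

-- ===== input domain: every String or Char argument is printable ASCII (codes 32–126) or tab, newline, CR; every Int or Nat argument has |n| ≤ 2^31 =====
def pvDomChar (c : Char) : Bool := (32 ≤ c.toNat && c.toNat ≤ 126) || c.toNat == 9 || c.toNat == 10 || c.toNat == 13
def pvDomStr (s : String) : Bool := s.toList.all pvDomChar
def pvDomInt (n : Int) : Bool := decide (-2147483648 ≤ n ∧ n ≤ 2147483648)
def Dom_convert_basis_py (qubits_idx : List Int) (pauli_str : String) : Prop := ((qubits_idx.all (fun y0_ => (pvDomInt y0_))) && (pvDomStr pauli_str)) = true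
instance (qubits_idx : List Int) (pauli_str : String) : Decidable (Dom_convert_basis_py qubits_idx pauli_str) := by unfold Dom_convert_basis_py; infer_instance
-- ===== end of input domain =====

-- B replaces A's single loop (which doubles the observable list per character while
-- appending ops) by staged passes: validation, a zip for the ops, a fold into a bit
-- mask, and a popcount-parity formula for the ±1 list (objective: alternative).

-- ===== PORT A =====
-- A's loop: carries obs_vals (doubled per char) and the op list; none = the raise
def pvA_loop (q : List Int) : List Char → Nat → List Int → List String → Option (List String × List Int)
  | [], _, obs, ops => some (ops, obs)
  | c :: cs, i, obs, ops =>
    match PySem.List.pyGet? q (i : Int) with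
    | none => none
    | some idx =>
      if c = 'x' then
        pvA_loop q cs (i + 1) (obs.flatMap fun x => [x, -x])
          (ops ++ ["h q[" ++ PySem.Int.toStr idx ++ "];"])
      else if c = 'y' then
        pvA_loop q cs (i + 1) (obs.flatMap fun x => [x, -x])
          (ops ++ ["sdg q[" ++ PySem.Int.toStr idx ++ "];", "h q[" ++ PySem.Int.toStr idx ++ "];"])
      else if c = 'z' then
        pvA_loop q cs (i + 1) (obs.flatMap fun x => [x, -x]) ops
      else if c = 'i' then
        pvA_loop q cs (i + 1) (obs.flatMap fun x => [x, x]) ops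
      else none

def convert_basis_py (qubits_idx : List Int) (pauli_str : String) : String × List Int :=
  match pvA_loop qubits_idx (PySem.Chars.lower pauli_str.toList) 0 [1] [] with
  | none => ("", [1])   -- unreachable under Pre_ (Python raises here)
  | some (ops, obs) =>
    if ops = [] then ("", obs)
    else (PySem.Str.join "\n" ops, obs)

-- ===== PORT B =====
-- _gate in Source B
def pvGate (c : Char) (idx : Int) : List String :=
  if c = 'x' then ["h q[" ++ PySem.Int.toStr idx ++ "];"]
  else if c = 'y' then ["sdg q[" ++ PySem.Int.toStr idx ++ "];", "h q[" ++ PySem.Int.toStr idx ++ "];"]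
  else []

-- bin(k).count("1"): count of 1-bits, ported as the halving recursion with fuel (n halvings suffice)
def pvOnesAux : Nat → Nat → Nat
  | 0, _ => 0
  | fuel + 1, n => if n = 0 then 0 else n % 2 + pvOnesAux fuel (n / 2)

def pvOnes (n : Nat) : Nat := pvOnesAux n n

def convert_basis_py_alt (qubits_idx : List Int) (pauli_str : String) : String × List Int :=
  let cs := PySem.Chars.lower pauli_str.toList
  match cs.find? (fun c => !(c == 'x' || c == 'y' || c == 'z' || c == 'i')) with
  | some _ => ("", [1])   -- Python raises ValueError here; unreachable under Pre_
  | none =>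
    let ops := (cs.zip qubits_idx).flatMap (fun p => pvGate p.1 p.2)
    let mask := cs.foldl (fun m c => 2 * m + (if c = 'i' then 0 else 1)) 0
    let obs := (List.range (1 <<< cs.length)).map
      (fun k => if pvOnes (k &&& mask) % 2 = 0 then (1 : Int) else -1)
    (PySem.Str.join "\n" ops, obs)

-- ===== PRECONDITION & SPEC =====
-- Pre_ excludes exactly the inputs where Python A raises: an IndexError when the Pauli
-- string is longer than qubits_idx, and a ValueError on any character outside i/x/y/z.
def Pre_convert_basis_py (qubits_idx : List Int) (pauli_str : String) : Prop :=
  pauli_str.toList.length ≤ qubits_idx.length ∧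
  ((PySem.Chars.lower pauli_str.toList).all (fun c => c == 'x' || c == 'y' || c == 'z' || c == 'i')) = true
instance (qubits_idx : List Int) (pauli_str : String) : Decidable (Pre_convert_basis_py qubits_idx pauli_str) := by unfold Pre_convert_basis_py; infer_instance

def pvWitness_convert_basis_py : List Int × String := ([0, 1, 2], "xYi")

def Spec_convert_basis_py (qubits_idx : List Int) (pauli_str : String) (out : String × List Int) : Prop := out = convert_basis_py_alt qubits_idx pauli_str
instance (qubits_idx : List Int) (pauli_str : String) (out : String × List Int) : Decidable (Spec_convert_basis_py qubits_idx pauli_str out) := by unfold Spec_convert_basis_py; infer_instance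

-- ===== CLAIM (what is proved, stated in full; the proofs are below) =====
def Claim_equal_convert_basis_py : Prop := ∀ (qubits_idx : List Int) (pauli_str : String), Dom_convert_basis_py qubits_idx pauli_str → Pre_convert_basis_py qubits_idx pauli_str → Spec_convert_basis_py qubits_idx pauli_str (convert_basis_py qubits_idx pauli_str)

-- ===== LEMMAS AND PROOFS =====

theorem pvOnesAux_zero (f : Nat) : pvOnesAux f 0 = 0 := by
  cases f <;> simp [pvOnesAux]

theorem pvOnesAux_congr (f f' n : Nat) (h : n ≤ f) (h' : n ≤ f') :
    pvOnesAux f n = pvOnesAux f' n := by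
  induction f generalizing f' n with
  | zero =>
    have : n = 0 := by omega
    subst this; rw [pvOnesAux_zero, pvOnesAux_zero]
  | succ g ih =>
    rcases Nat.eq_zero_or_pos n with rfl | hn
    · rw [pvOnesAux_zero, pvOnesAux_zero]
    · obtain ⟨g', rfl⟩ : ∃ g', f' = g' + 1 := ⟨f' - 1, by omega⟩
      have hne : ¬ n = 0 := by omega
      simp only [pvOnesAux, hne, if_false]
      rw [ih g' (n / 2) (by omega) (by omega)]

theorem pvOnes_bit (p c : Nat) (hc : c < 2) : pvOnes (2 * p + c) = c + pvOnes p := by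
  unfold pvOnes
  rcases Nat.eq_zero_or_pos (2 * p + c) with h0 | hpos
  · have hp : p = 0 := by omega
    have hcz : c = 0 := by omega
    subst hp; subst hcz
    simp [pvOnesAux_zero]
  · obtain ⟨g, hg⟩ : ∃ g, 2 * p + c = g + 1 := ⟨2 * p + c - 1, by omega⟩
    rw [hg]
    have hne : ¬ (g + 1 = 0) := by omega
    simp only [pvOnesAux, if_neg hne]
    have hmod : (g + 1) % 2 = c := by omega
    have hdiv : (g + 1) / 2 = p := by omega
    rw [hmod, hdiv, pvOnesAux_congr g p p (by omega) (by omega)]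

-- the ±1 list computed from a mask, at width t
def pvObs (t m : Nat) : List Int :=
  (List.range (1 <<< t)).map (fun k => if pvOnes (k &&& m) % 2 = 0 then (1 : Int) else -1)

theorem pvLand_bit (q m r b : Nat) (hr : r < 2) (hb : b < 2) :
    (2 * q + r) &&& (2 * m + b) = 2 * (q &&& m) + (r &&& b) := by
  have hq : 2 * q + r = Nat.bit (decide (r = 1)) q := by
    rcases (by omega : r = 0 ∨ r = 1) with rfl | rfl <;> simp [Nat.bit_val]
  have hm : 2 * m + b = Nat.bit (decide (b = 1)) m := by
    rcases (by omega : b = 0 ∨ b = 1) with rfl | rfl <;> simp [Nat.bit_val]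
  rw [hq, hm, Nat.land_bit, Nat.bit_val]
  congr 1
  rcases (by omega : r = 0 ∨ r = 1) with rfl | rfl <;>
    rcases (by omega : b = 0 ∨ b = 1) with rfl | rfl <;> decide

theorem pvRange_two_mul (N : Nat) (f : Nat → Int) :
    (List.range (2 * N)).map f = (List.range N).flatMap (fun q => [f (2 * q), f (2 * q + 1)]) := by
  induction N with
  | zero => simp
  | succ n ih =>
    have h2 : 2 * (n + 1) = (2 * n) + 1 + 1 := by ring
    rw [h2, List.range_succ, List.range_succ, List.range_succ]
    simp [ih]

theorem pvObs_step (t m b : Nat) (hb : b < 2) :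
    pvObs (t + 1) (2 * m + b) =
      (pvObs t m).flatMap (fun x => [x, if b = 1 then -x else x]) := by
  unfold pvObs
  have hshift : (1 : Nat) <<< (t + 1) = 2 * (1 <<< t) := by
    simp only [Nat.shiftLeft_eq, pow_succ]; ring
  rw [hshift, pvRange_two_mul, List.flatMap_map]
  refine congrArg (fun f => List.flatMap f (List.range (1 <<< t))) (funext fun q => ?_)
  have he : 2 * q &&& (2 * m + b) = 2 * (q &&& m) + 0 := by
    have hz : 0 &&& b = 0 := by
      rcases (by omega : b = 0 ∨ b = 1) with rfl | rfl <;> decide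
    have h := pvLand_bit q m 0 b (by omega) hb
    rw [hz] at h
    simpa using h
  have ho : 2 * q + 1 &&& (2 * m + b) = 2 * (q &&& m) + b := by
    have h1b : 1 &&& b = b := by
      rcases (by omega : b = 0 ∨ b = 1) with rfl | rfl <;> decide
    have h := pvLand_bit q m 1 b (by omega) hb
    rw [h1b] at h
    exact h
  rw [he, ho, pvOnes_bit _ 0 (by omega), pvOnes_bit _ b hb]
  rcases (by omega : b = 0 ∨ b = 1) with rfl | rfl <;>
    rcases Nat.mod_two_eq_zero_or_one (pvOnes (q &&& m)) with hp | hp <;>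
      simp [hp, Nat.add_mod]

theorem pvObs_zero : pvObs 0 0 = [1] := by
  unfold pvObs
  simp [pvOnes, pvOnesAux_zero]

-- A's loop, on a valid in-range suffix, produces B's zip-built ops and B's mask/obs
theorem pvA_loop_eq (q : List Int) (cs : List Char) :
    ∀ (i t m : Nat) (ops : List String),
      (∀ c ∈ cs, c = 'x' ∨ c = 'y' ∨ c = 'z' ∨ c = 'i') →
      i + cs.length ≤ q.length →
      pvA_loop q cs i (pvObs t m) ops =
        some (ops ++ (cs.zip (q.drop i)).flatMap (fun p => pvGate p.1 p.2),
              pvObs (t + cs.length) (cs.foldl (fun m c => 2 * m + (if c = 'i' then 0 else 1)) m)) := by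
  induction cs with
  | nil => intro i t m ops _ _; simp [pvA_loop]
  | cons c cs ih =>
    intro i t m ops hval hlen
    have hi : i < q.length := by simp at hlen; omega
    have hget : PySem.List.pyGet? q (i : Int) = some q[i] := by
      rw [PySem.List.pyGet?_natCast]; simp [hi]
    have hdrop : q.drop i = q[i] :: q.drop (i + 1) := List.drop_eq_getElem_cons hi
    have hval' : ∀ c ∈ cs, c = 'x' ∨ c = 'y' ∨ c = 'z' ∨ c = 'i' := fun d hd => hval d (List.mem_cons_of_mem _ hd)
    have hlen' : (i + 1) + cs.length ≤ q.length := by simp at hlen ⊢; omega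
    simp only [pvA_loop, hget]
    rcases hval c (List.mem_cons_self) with rfl | rfl | rfl | rfl
    · -- 'x'
      have hx : (pvObs t m).flatMap (fun x => [x, -x]) = pvObs (t + 1) (2 * m + 1) := by
        rw [pvObs_step t m 1 (by omega)]; simp
      simp only [if_pos rfl, hx, ih (i+1) (t+1) (2*m+1) _ hval' hlen', hdrop]
      have ht : t + 1 + cs.length = t + (cs.length + 1) := by omega
      rw [ht]
      simp only [List.zip_cons_cons, List.flatMap_cons, List.foldl_cons, List.length_cons,
        pvGate, List.append_assoc, List.cons_append, List.nil_append, List.singleton_append]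
      simp
    · -- 'y'
      have hx : (pvObs t m).flatMap (fun x => [x, -x]) = pvObs (t + 1) (2 * m + 1) := by
        rw [pvObs_step t m 1 (by omega)]; simp
      simp only [reduceIte, hx, ih (i+1) (t+1) (2*m+1) _ hval' hlen', hdrop]
      have ht : t + 1 + cs.length = t + (cs.length + 1) := by omega
      rw [ht]
      simp only [List.zip_cons_cons, List.flatMap_cons, List.foldl_cons, List.length_cons,
        pvGate, List.append_assoc, List.cons_append, List.nil_append, List.singleton_append]
      simp
    · -- 'z'
      have hx : (pvObs t m).flatMap (fun x => [x, -x]) = pvObs (t + 1) (2 * m + 1) := by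
        rw [pvObs_step t m 1 (by omega)]; simp
      simp only [reduceIte, hx, ih (i+1) (t+1) (2*m+1) _ hval' hlen', hdrop]
      have ht : t + 1 + cs.length = t + (cs.length + 1) := by omega
      rw [ht]
      simp only [List.zip_cons_cons, List.flatMap_cons, List.foldl_cons, List.length_cons,
        pvGate, List.append_assoc, List.cons_append, List.nil_append, List.singleton_append]
      simp
    · -- 'i'
      have hx : (pvObs t m).flatMap (fun x => [x, x]) = pvObs (t + 1) (2 * m) := by
        have := pvObs_step t m 0 (by omega)
        simp only [Nat.add_zero] at this
        rw [this]; simp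
      simp only [reduceIte, hx, ih (i+1) (t+1) (2*m) _ hval' hlen', hdrop]
      have ht : t + 1 + cs.length = t + (cs.length + 1) := by omega
      rw [ht]
      simp only [List.zip_cons_cons, List.flatMap_cons, List.foldl_cons, List.length_cons,
        pvGate, List.append_assoc, List.cons_append, List.nil_append, List.singleton_append]
      simp

theorem pvJoin_nil : PySem.Str.join "\n" [] = "" := by decide

-- ===== VERDICT (by name: the statement is the Claim_ definition above) =====
theorem convert_basis_py_spec : Claim_equal_convert_basis_py := by
  intro q s _ hpre
  obtain ⟨hlen, hval⟩ := hpre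
  unfold Spec_convert_basis_py convert_basis_py convert_basis_py_alt
  set cs := PySem.Chars.lower s.toList with hcs
  have hlcs : cs.length = s.toList.length := by
    simp [hcs, PySem.Chars.lower]
  have hval' : ∀ c ∈ cs, c = 'x' ∨ c = 'y' ∨ c = 'z' ∨ c = 'i' := by
    intro c hc
    have := List.all_eq_true.mp hval c hc
    simp at this
    tauto
  have hfind : cs.find? (fun c => !(c == 'x' || c == 'y' || c == 'z' || c == 'i')) = none := by
    rw [List.find?_eq_none]
    intro c hc
    rcases hval' c hc with rfl | rfl | rfl | rfl <;> decide
  have h10 : ([(1 : Int)]) = pvObs 0 0 := pvObs_zero.symm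
  rw [h10, pvA_loop_eq q cs 0 0 0 [] hval' (by omega)]
  simp only [hfind, List.drop_zero, List.nil_append, Nat.zero_add]
  by_cases hops : (cs.zip q).flatMap (fun p => pvGate p.1 p.2) = []
  · simp [hops, pvJoin_nil, pvObs]
  · simp [hops, pvObs]
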